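-- pv_equiv track=rewrite | github.com/jihoyeo/seoul-travel-demand-2024 | seoul_zoning_viz/export_zoning.py | pick_zone_class
-- ===== SOURCE A (Python) =====
-- ZONE_CLASS_MAP = {
--     # 전용주거
--     "UQA111": "전용주거",
--     "UQA112": "전용주거",
--     # 일반주거
--     "UQA121": "일반주거_저밀(1종)",
--     "UQA122": "일반주거_중밀(2종)",
--     "UQA123": "일반주거_고밀(3종)",
--     # 준주거
--     "UQA130": "준주거",
--     # 상업
--     "UQA210": "중심·일반상업",
--     "UQA220": "중심·일반상업",
--     "UQA230": "근린·유통상업",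
--     "UQA240": "근린·유통상업",
--     # 공업
--     "UQA310": "전용공업",
--     "UQA320": "일반·준공업",
--     "UQA330": "일반·준공업",
--     # 녹지
--     "UQA410": "보전·자연녹지",
--     "UQA430": "보전·자연녹지",
--     "UQA420": "생산녹지",
--     # 관리·농림·자연환경 (서울엔 거의 없음)
--     "UQA510": "관리·농림·자연환경",
--     "UQA520": "관리·농림·자연환경",
--     "UQA530": "관리·농림·자연환경",
--     "UQA610": "관리·농림·자연환경",
--     "UQA710": "관리·농림·자연환경",
-- }
--
-- SPECIFIC_PREFIXES = ("UQA1", "UQA2", "UQA3", "UQA4", "UQA5", "UQA6", "UQA7")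
--
-- GENERIC_URBAN = {"UQA01X", "UQA001", "UQA002"}
--
-- def pick_zone_class(a7: str) -> tuple[str, str]:
--     """A7 코드 리스트에서 (zone_code, zone_class) 반환."""
--     if not a7:
--         return ("", "미지정")
--     codes = [c.strip() for c in a7.split(",") if c.strip()]
--     # 1) specific 코드 우선 (UQA1xx~7xx)
--     for c in codes:
--         if c in ZONE_CLASS_MAP:
--             return (c, ZONE_CLASS_MAP[c])
--     # 2) prefix만 맞는 알 수 없는 변형은 prefix-기반 fallback
--     for c in codes:
--         if c.startswith(SPECIFIC_PREFIXES) and len(c) >= 5: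
--             digit = c[3]
--             if digit == "1":
--                 return (c, "일반주거_중밀(2종)" if c[4] == "2" else "일반주거_기타")
--             if digit == "2":
--                 return (c, "중심·일반상업")
--             if digit == "3":
--                 return (c, "일반·준공업")
--             if digit == "4":
--                 return (c, "보전·자연녹지")
--     # 3) 도시지역 일반 (UQA01X 등) — 세부 미지정
--     for c in codes:
--         if c in GENERIC_URBAN:
--             return (c, "도시지역_세부미지정")
--     return ("", "미지정")
-- ===== SOURCE B (Python) =====
-- ZONE_CLASS_MAP = {
--     "UQA111": "전용주거",
--     "UQA112": "전용주거",
--     "UQA121": "일반주거_저밀(1종)",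
--     "UQA122": "일반주거_중밀(2종)",
--     "UQA123": "일반주거_고밀(3종)",
--     "UQA130": "준주거",
--     "UQA210": "중심·일반상업",
--     "UQA220": "중심·일반상업",
--     "UQA230": "근린·유통상업",
--     "UQA240": "근린·유통상업",
--     "UQA310": "전용공업",
--     "UQA320": "일반·준공업",
--     "UQA330": "일반·준공업",
--     "UQA410": "보전·자연녹지",
--     "UQA430": "보전·자연녹지",
--     "UQA420": "생산녹지",
--     "UQA510": "관리·농림·자연환경",
--     "UQA520": "관리·농림·자연환경",
--     "UQA530": "관리·농림·자연환경",
--     "UQA610": "관리·농림·자연환경",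
--     "UQA710": "관리·농림·자연환경",
-- }
--
-- SPECIFIC_PREFIXES = ("UQA1", "UQA2", "UQA3", "UQA4", "UQA5", "UQA6", "UQA7")
--
-- GENERIC_URBAN = {"UQA01X", "UQA001", "UQA002"}
--
--
-- def _classify(c):
--     """Map one code to (priority tier, zone class): 0 exact, 1 prefix fallback, 2 generic urban, 3 unknown."""
--     cls = ZONE_CLASS_MAP.get(c)
--     if cls is not None:
--         return 0, cls
--     if c.startswith(SPECIFIC_PREFIXES) and len(c) >= 5:
--         d = c[3]
--         if d == "1":
--             return 1, ("일반주거_중밀(2종)" if c[4] == "2" else "일반주거_기타")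
--         if d == "2":
--             return 1, "중심·일반상업"
--         if d == "3":
--             return 1, "일반·준공업"
--         if d == "4":
--             return 1, "보전·자연녹지"
--     if c in GENERIC_URBAN:
--         return 2, "도시지역_세부미지정"
--     return 3, ""
--
--
-- def pick_zone_class(a7: str) -> tuple[str, str]:
--     """A7 코드 리스트에서 (zone_code, zone_class) 반환 — single min-tracking pass."""
--     if not a7:
--         return ("", "미지정")
--     best_tier, best_code, best_cls = 3, "", ""
--     for piece in a7.split(","):
--         c = piece.strip()
--         if not c:
--             continue
--         tier, cls = _classify(c)
--         if tier < best_tier: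
--             best_tier, best_code, best_cls = tier, c, cls
--             if tier == 0:
--                 break
--     return (best_code, best_cls) if best_tier < 3 else ("", "미지정")
-- ===== Notes on version B (the rewrite author's own statement) =====
-- stated objective: alternative
-- what changed: Replaces A's three ordered scans over the code list by a single min-tracking pass that maps each code to a priority tier (exact map hit, prefix fallback, generic urban, unknown) and keeps the first code with the lowest tier, breaking early on tier 0.
import Mathlib
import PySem

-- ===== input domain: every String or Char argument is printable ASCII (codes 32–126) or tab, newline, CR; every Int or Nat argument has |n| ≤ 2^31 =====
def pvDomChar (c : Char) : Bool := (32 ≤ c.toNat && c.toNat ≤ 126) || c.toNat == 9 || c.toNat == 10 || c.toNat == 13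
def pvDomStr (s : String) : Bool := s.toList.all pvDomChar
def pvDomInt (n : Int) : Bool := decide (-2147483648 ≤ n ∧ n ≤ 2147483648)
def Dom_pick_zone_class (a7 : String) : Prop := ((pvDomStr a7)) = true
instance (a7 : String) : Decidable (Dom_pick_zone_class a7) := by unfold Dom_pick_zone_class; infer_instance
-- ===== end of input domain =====

-- B replaces A's three ordered scans by one min-tracking pass over a per-code priority tier (objective: alternative decomposition, same cost).

-- shared module-level constants
def zoneClassMap : PySem.Dict String String := PySem.Dict.ofList [
  ("UQA111","전용주거"), ("UQA112","전용주거"),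
  ("UQA121","일반주거_저밀(1종)"), ("UQA122","일반주거_중밀(2종)"), ("UQA123","일반주거_고밀(3종)"),
  ("UQA130","준주거"),
  ("UQA210","중심·일반상업"), ("UQA220","중심·일반상업"), ("UQA230","근린·유통상업"), ("UQA240","근린·유통상업"),
  ("UQA310","전용공업"), ("UQA320","일반·준공업"), ("UQA330","일반·준공업"),
  ("UQA410","보전·자연녹지"), ("UQA430","보전·자연녹지"), ("UQA420","생산녹지"),
  ("UQA510","관리·농림·자연환경"), ("UQA520","관리·농림·자연환경"), ("UQA530","관리·농림·자연환경"),
  ("UQA610","관리·농림·자연환경"), ("UQA710","관리·농림·자연환경")]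

def specificPrefixes : List String := ["UQA1","UQA2","UQA3","UQA4","UQA5","UQA6","UQA7"]

def genericUrban : PySem.Set String := PySem.Set.ofList ["UQA01X","UQA001","UQA002"]

-- ===== PORT A =====
-- pass 1: 'for c in codes: if c in ZONE_CLASS_MAP: return …'
def passA1 : List String → Option (String × String)
  | [] => none
  | c :: rest =>
    match zoneClassMap.get? c with
    | some v => some (c, v)
    | none => passA1 rest

-- pass 2: prefix-based fallback
def passA2 : List String → Option (String × String)
  | [] => none
  | c :: rest =>
    if (specificPrefixes.any (fun p => PySem.Str.startswith c p)) && (5 ≤ PySem.Str.len c) then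
      -- c[3] / c[4] are in range because len c ≥ 5 was just checked
      let digit := (PySem.Str.pyGet? c 3).getD ' '
      if digit = '1' then
        some (c, if (PySem.Str.pyGet? c 4).getD ' ' = '2' then "일반주거_중밀(2종)" else "일반주거_기타")
      else if digit = '2' then some (c, "중심·일반상업")
      else if digit = '3' then some (c, "일반·준공업")
      else if digit = '4' then some (c, "보전·자연녹지")
      else passA2 rest
    else passA2 rest

-- pass 3: generic urban
def passA3 : List String → Option (String × String)
  | [] => none
  | c :: rest =>
    if genericUrban.contains c then some (c, "도시지역_세부미지정") else passA3 rest

def pick_zone_class (a7 : String) : String × String :=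
  if a7 = "" then ("", "미지정")
  else
    let codes := (((PySem.Str.split? a7 ",").getD []).map (fun c => PySem.Str.strip c)).filter (fun c => !(c == ""))
    match passA1 codes with
    | some r => r
    | none =>
      match passA2 codes with
      | some r => r
      | none =>
        match passA3 codes with
        | some r => r
        | none => ("", "미지정")

-- ===== PORT B =====
-- fallthrough tail of _classify ('if c in GENERIC_URBAN … return 3, ""')
def classifyTail (c : String) : Nat × String :=
  if genericUrban.contains c then (2, "도시지역_세부미지정") else (3, "")

-- _classify: one code → (priority tier, zone class)
def classifyB (c : String) : Nat × String :=
  match zoneClassMap.get? c with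
  | some cls => (0, cls)
  | none =>
    if (specificPrefixes.any (fun p => PySem.Str.startswith c p)) && (5 ≤ PySem.Str.len c) then
      let d := (PySem.Str.pyGet? c 3).getD ' '   -- in range: len c ≥ 5
      if d = '1' then (1, if (PySem.Str.pyGet? c 4).getD ' ' = '2' then "일반주거_중밀(2종)" else "일반주거_기타")
      else if d = '2' then (1, "중심·일반상업")
      else if d = '3' then (1, "일반·준공업")
      else if d = '4' then (1, "보전·자연녹지")
      else classifyTail c
    else classifyTail c

-- the single min-tracking loop (state: best tier, best code, best class; break on tier 0)
def loopB : List String → Nat × String × String → Nat × String × String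
  | [], best => best
  | piece :: rest, best =>
    let c := PySem.Str.strip piece
    if c == "" then loopB rest best
    else
      let tc := classifyB c
      if tc.1 < best.1 then
        if tc.1 = 0 then (tc.1, c, tc.2) else loopB rest (tc.1, c, tc.2)
      else loopB rest best

def pick_zone_class_alt (a7 : String) : String × String :=
  if a7 = "" then ("", "미지정")
  else
    let best := loopB ((PySem.Str.split? a7 ",").getD []) (3, "", "")
    if best.1 < 3 then (best.2.1, best.2.2) else ("", "미지정")

-- ===== PRECONDITION & SPEC =====
def Spec_pick_zone_class (a7 : String) (out : String × String) : Prop := out = pick_zone_class_alt a7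
instance (a7 : String) (out : String × String) : Decidable (Spec_pick_zone_class a7 out) := by unfold Spec_pick_zone_class; infer_instance

-- ===== CLAIM (what is proved, stated in full; the proofs are below) =====
def Claim_equal_pick_zone_class : Prop := ∀ (a7 : String), Dom_pick_zone_class a7 → Spec_pick_zone_class a7 (pick_zone_class a7)

-- ===== LEMMAS AND PROOFS =====

-- the cleaned code list A iterates over
def pvClean (R : List String) : List String :=
  (R.map (fun c => PySem.Str.strip c)).filter (fun c => !(c == ""))

-- what pass 2 yields on a single code (proof-only characterisation)
def p2v (c : String) : Option String :=
  if (specificPrefixes.any (fun p => PySem.Str.startswith c p)) && (5 ≤ PySem.Str.len c) then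
    let digit := (PySem.Str.pyGet? c 3).getD ' '
    if digit = '1' then some (if (PySem.Str.pyGet? c 4).getD ' ' = '2' then "일반주거_중밀(2종)" else "일반주거_기타")
    else if digit = '2' then some "중심·일반상업"
    else if digit = '3' then some "일반·준공업"
    else if digit = '4' then some "보전·자연녹지"
    else none
  else none

theorem passA2_cons (c : String) (L : List String) :
    passA2 (c :: L) = match p2v c with
      | some v => some (c, v)
      | none => passA2 L := by
  simp only [passA2, p2v]
  split_ifs <;> rfl

theorem classifyB_char (c : String) :
    classifyB c =
      match zoneClassMap.get? c with
      | some v => (0, v)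
      | none =>
        match p2v c with
        | some v => (1, v)
        | none => if genericUrban.contains c then (2, "도시지역_세부미지정") else (3, "") := by
  cases hm : zoneClassMap.get? c with
  | some v => simp [classifyB, hm]
  | none =>
    simp only [classifyB, classifyTail, p2v, hm]
    split_ifs <;> rfl

theorem pvClean_cons_ne (p : String) (rest : List String) (hs : ¬ PySem.Str.strip p = "") :
    pvClean (p :: rest) = PySem.Str.strip p :: pvClean rest := by
  simp [pvClean, hs]

theorem loopB_cons_ne (p : String) (rest : List String) (best : Nat × String × String)
    (hs : ¬ PySem.Str.strip p = "") :
    loopB (p :: rest) best =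
      (if (classifyB (PySem.Str.strip p)).1 < best.1 then
        if (classifyB (PySem.Str.strip p)).1 = 0 then
          ((classifyB (PySem.Str.strip p)).1, PySem.Str.strip p, (classifyB (PySem.Str.strip p)).2)
        else loopB rest ((classifyB (PySem.Str.strip p)).1, PySem.Str.strip p, (classifyB (PySem.Str.strip p)).2)
      else loopB rest best) := by
  simp only [loopB]
  rw [if_neg (by simp [hs])]

-- state tier 1: only pass 1 can still improve
theorem loopB_one (R : List String) (x y : String) :
    loopB R (1, x, y) =
      match passA1 (pvClean R) with
      | some (c, v) => (0, c, v)
      | none => (1, x, y) := by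
  induction R with
  | nil => simp [loopB, pvClean, passA1]
  | cons p rest ih =>
    by_cases hs : PySem.Str.strip p = ""
    · simpa [loopB, pvClean, hs] using ih
    · rw [pvClean_cons_ne p rest hs, loopB_cons_ne p rest _ hs, classifyB_char]
      cases hm : zoneClassMap.get? (PySem.Str.strip p) with
      | some v => simp [passA1, hm]
      | none =>
        cases hq : p2v (PySem.Str.strip p) with
        | some v =>
          rw [if_neg (by norm_num)]
          simpa [passA1, hm] using ih
        | none =>
          rw [if_neg (by split_ifs <;> norm_num)]
          simpa [passA1, hm] using ih

-- state tier 2: passes 1 and 2 can still improve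
theorem loopB_two (R : List String) (x y : String) :
    loopB R (2, x, y) =
      match passA1 (pvClean R) with
      | some (c, v) => (0, c, v)
      | none =>
        match passA2 (pvClean R) with
        | some (c, v) => (1, c, v)
        | none => (2, x, y) := by
  induction R with
  | nil => simp [loopB, pvClean, passA1, passA2]
  | cons p rest ih =>
    by_cases hs : PySem.Str.strip p = ""
    · simpa [loopB, pvClean, hs] using ih
    · rw [pvClean_cons_ne p rest hs, loopB_cons_ne p rest _ hs, classifyB_char,
        passA2_cons]
      cases hm : zoneClassMap.get? (PySem.Str.strip p) with
      | some v => simp [passA1, hm]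
      | none =>
        cases hq : p2v (PySem.Str.strip p) with
        | some v =>
          rw [if_pos (by norm_num), if_neg (by norm_num), loopB_one]
          simp [passA1, hm]
        | none =>
          rw [if_neg (by split_ifs <;> norm_num)]
          simpa [passA1, hm] using ih

-- initial state tier 3: all three passes, exactly A's chain
theorem loopB_three (R : List String) (x y : String) :
    loopB R (3, x, y) =
      match passA1 (pvClean R) with
      | some (c, v) => (0, c, v)
      | none =>
        match passA2 (pvClean R) with
        | some (c, v) => (1, c, v)
        | none =>
          match passA3 (pvClean R) with
          | some (c, v) => (2, c, v)
          | none => (3, x, y) := by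
  induction R with
  | nil => simp [loopB, pvClean, passA1, passA2, passA3]
  | cons p rest ih =>
    by_cases hs : PySem.Str.strip p = ""
    · simpa [loopB, pvClean, hs] using ih
    · rw [pvClean_cons_ne p rest hs, loopB_cons_ne p rest _ hs, classifyB_char,
        passA2_cons]
      cases hm : zoneClassMap.get? (PySem.Str.strip p) with
      | some v => simp [passA1, hm]
      | none =>
        cases hq : p2v (PySem.Str.strip p) with
        | some v =>
          rw [if_pos (by norm_num), if_neg (by norm_num), loopB_one]
          simp [passA1, hm]
        | none =>
          by_cases hg : genericUrban.contains (PySem.Str.strip p) = true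
          · have hg' : PySem.Str.strip p ∈ genericUrban := by simpa using hg
            rw [if_pos hg, if_pos (by norm_num), if_neg (by norm_num), loopB_two]
            simp [passA1, passA3, hm, hg']
          · have hg' : ¬ PySem.Str.strip p ∈ genericUrban := by simpa using hg
            rw [if_neg hg, if_neg (by norm_num)]
            simpa [passA1, passA3, hm, hg'] using ih

-- ===== VERDICT (by name: the statement is the Claim_ definition above) =====
theorem pick_zone_class_spec : Claim_equal_pick_zone_class := by
  intro a7 _
  unfold Spec_pick_zone_class pick_zone_class pick_zone_class_alt
  by_cases h : a7 = ""
  · simp [h]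
  · simp only [if_neg h]
    rw [show (((PySem.Str.split? a7 ",").getD []).map (fun c => PySem.Str.strip c)).filter
          (fun c => !(c == "")) = pvClean ((PySem.Str.split? a7 ",").getD []) from rfl]
    rw [loopB_three]
    cases passA1 (pvClean ((PySem.Str.split? a7 ",").getD [])) with
    | some r => cases r; simp
    | none =>
      cases passA2 (pvClean ((PySem.Str.split? a7 ",").getD [])) with
      | some r => cases r; simp
      | none =>
        cases passA3 (pvClean ((PySem.Str.split? a7 ",").getD [])) with
        | some r => cases r; simp
        | none => simp
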